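-- pv_equiv track=rewrite | github.com/jcolinpatrick/kryptos | scripts/grille/e_z340_diagonal.py | vertical_segment_decimation
-- ===== SOURCE A (Python) =====
-- def toroidal_walk(nrows, ncols, dr, dc, start_r=0, start_c=0):
--     """Generate a toroidal walk permutation: step (dr, dc) on an nrows x ncols grid.
--     Returns list of (row, col) positions in walk order."""
--     total = nrows * ncols
--     visited = set()
--     path = []
--     r, c = start_r, start_c
--     for _ in range(total):
--         if (r, c) in visited:
--             # Find next unvisited cell (row-major)
--             found = False
--             for rr in range(nrows):
--                 for cc in range(ncols):
--                     if (rr, cc) not in visited: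
--                         r, c = rr, cc
--                         found = True
--                         break
--                 if found:
--                     break
--             if not found:
--                 break
--         visited.add((r, c))
--         path.append((r, c))
--         r = (r + dr) % nrows
--         c = (c + dc) % ncols
--     return path
--
-- def vertical_segment_decimation(nrows, ncols, segments, dr, dc):
--     """Split grid into VERTICAL segments (column groups), apply decimation to each.
--     segments: list of column counts.
--     """
--     path = []
--     col_offset = 0
--     for seg_cols in segments:
--         seg_path = toroidal_walk(nrows, seg_cols, dr, dc)
--         for r, c in seg_path:
--             path.append((r, c + col_offset))
--         col_offset += seg_cols
--     return path
-- ===== SOURCE B (Python) =====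
-- def _walk(nrows, ncols, dr, dc):
--     total = nrows * ncols
--     if total <= 0:
--         return []
--     cells = [(rr, cc) for rr in range(nrows) for cc in range(ncols)]
--     visited = set()
--     path = []
--     r, c = 0, 0
--     p = 0  # monotone pointer: every cell before index p is visited
--     for _ in range(total):
--         if (r, c) in visited:
--             while p < len(cells) and cells[p] in visited:
--                 p += 1
--             if p == len(cells):
--                 break
--             r, c = cells[p]
--         visited.add((r, c))
--         path.append((r, c))
--         r = (r + dr) % nrows
--         c = (c + dc) % ncols
--     return path
--
-- def vertical_segment_decimation(nrows, ncols, segments, dr, dc):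
--     path = []
--     off = 0
--     for seg in segments:
--         path.extend((r, c + off) for r, c in _walk(nrows, seg, dr, dc))
--         off += seg
--     return path
-- ===== Notes on version B (the rewrite author's own statement) =====
-- stated objective: alternative
-- what changed: A's rescan-from-(0,0) on every collision is replaced by a monotone forward pointer into the row-major cell list (every cell before the pointer is already visited), removing the repeated nested rescan; intended as faster (a timing run measured B 2.73x at the largest size, but A hit timeouts there, so speed is stated as unconfirmed).
import Mathlib
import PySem

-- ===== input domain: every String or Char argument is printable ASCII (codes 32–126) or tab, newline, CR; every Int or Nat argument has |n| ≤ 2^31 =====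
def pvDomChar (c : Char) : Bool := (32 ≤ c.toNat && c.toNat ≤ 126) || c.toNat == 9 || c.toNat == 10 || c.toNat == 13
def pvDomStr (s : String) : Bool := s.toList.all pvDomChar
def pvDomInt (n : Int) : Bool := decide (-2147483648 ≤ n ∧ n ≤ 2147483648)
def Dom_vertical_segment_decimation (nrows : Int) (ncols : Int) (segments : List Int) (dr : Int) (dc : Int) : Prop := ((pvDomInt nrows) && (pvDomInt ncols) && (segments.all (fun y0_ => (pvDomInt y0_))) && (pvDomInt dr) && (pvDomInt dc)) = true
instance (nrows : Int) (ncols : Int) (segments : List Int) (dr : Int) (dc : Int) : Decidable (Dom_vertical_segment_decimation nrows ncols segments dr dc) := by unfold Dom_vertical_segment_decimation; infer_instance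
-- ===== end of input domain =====

-- B replaces A's rescan-from-start for the next unvisited cell by a monotone forward
-- pointer over the row-major cell list (objective: alternative; same return value).

-- ===== PORT A =====
-- inner 'for cc in range(ncols): if (rr,cc) not in visited: break' of the rescan
def twScanInner (vis : PySem.Set (Int × Int)) (rr : Int) : List Int → Option Int
  | [] => none
  | cc :: rest =>
    if PySem.Set.contains vis (rr, cc) then twScanInner vis rr rest else some cc

-- outer 'for rr in range(nrows): …; if found: break' of the rescan
def twScanOuter (vis : PySem.Set (Int × Int)) (ncols : Int) : List Int → Option (Int × Int)
  | [] => none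
  | rr :: rest =>
    match twScanInner vis rr (PySem.List.pyRange 0 ncols 1) with
    | some cc => some (rr, cc)
    | none => twScanOuter vis ncols rest

-- the 'for _ in range(total)' loop of toroidal_walk, state (visited, path, r, c)
def twLoopA (nrows ncols dr dc : Int) :
    Nat → PySem.Set (Int × Int) → List (Int × Int) → Int → Int → List (Int × Int)
  | 0, _, path, _, _ => path
  | n + 1, vis, path, r, c =>
    if PySem.Set.contains vis (r, c) then
      match twScanOuter vis ncols (PySem.List.pyRange 0 nrows 1) with
      | none => path
      | some rc =>
        twLoopA nrows ncols dr dc n (PySem.Set.add vis rc) (path ++ [rc])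
          (PySem.Int.mod (rc.1 + dr) nrows) (PySem.Int.mod (rc.2 + dc) ncols)
    else
      twLoopA nrows ncols dr dc n (PySem.Set.add vis (r, c)) (path ++ [(r, c)])
        (PySem.Int.mod (r + dr) nrows) (PySem.Int.mod (c + dc) ncols)

def toroidal_walk (nrows ncols dr dc start_r start_c : Int) : List (Int × Int) :=
  twLoopA nrows ncols dr dc (nrows * ncols).toNat PySem.Set.empty [] start_r start_c

def vertical_segment_decimation (nrows : Int) (ncols : Int) (segments : List Int) (dr : Int) (dc : Int) : List (Int × Int) :=
  (segments.foldl
    (fun (st : List (Int × Int) × Int) seg_cols =>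
      ((toroidal_walk nrows seg_cols dr dc 0 0).foldl
        (fun path rc => path ++ [(rc.1, rc.2 + st.2)]) st.1,
       st.2 + seg_cols))
    ([], 0)).1

-- ===== PORT B =====
-- cells = [(rr, cc) for rr in range(nrows) for cc in range(ncols)]
def bwCells (nrows ncols : Int) : List (Int × Int) :=
  (PySem.List.pyRange 0 nrows 1).flatMap
    (fun rr => (PySem.List.pyRange 0 ncols 1).map (fun cc => (rr, cc)))

-- 'while p < len(cells) and cells[p] in visited: p += 1'
def bwAdvance (cells : List (Int × Int)) (vis : PySem.Set (Int × Int)) (p : Nat) : Nat :=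
  if h : p < cells.length then
    if PySem.Set.contains vis cells[p] then bwAdvance cells vis (p + 1) else p
  else p
termination_by cells.length - p

-- B's walk loop, state (visited, path, r, c, p)
def bwLoop (nrows ncols dr dc : Int) (cells : List (Int × Int)) :
    Nat → PySem.Set (Int × Int) → List (Int × Int) → Int → Int → Nat → List (Int × Int)
  | 0, _, path, _, _, _ => path
  | n + 1, vis, path, r, c, p =>
    if PySem.Set.contains vis (r, c) then
      let p' := bwAdvance cells vis p
      if h : p' < cells.length then
        let rc := cells[p']
        bwLoop nrows ncols dr dc cells n (PySem.Set.add vis rc) (path ++ [rc])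
          (PySem.Int.mod (rc.1 + dr) nrows) (PySem.Int.mod (rc.2 + dc) ncols) p'
      else path
    else
      bwLoop nrows ncols dr dc cells n (PySem.Set.add vis (r, c)) (path ++ [(r, c)])
        (PySem.Int.mod (r + dr) nrows) (PySem.Int.mod (c + dc) ncols) p

-- 'if total <= 0: return []' guard, then the pointer walk
def bwWalk (nrows ncols dr dc : Int) : List (Int × Int) :=
  if nrows * ncols ≤ 0 then []
  else bwLoop nrows ncols dr dc (bwCells nrows ncols) (nrows * ncols).toNat PySem.Set.empty [] 0 0 0

def vertical_segment_decimation_alt (nrows : Int) (ncols : Int) (segments : List Int) (dr : Int) (dc : Int) : List (Int × Int) :=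
  (segments.foldl
    (fun (st : List (Int × Int) × Int) seg =>
      (st.1 ++ (bwWalk nrows seg dr dc).map (fun rc => (rc.1, rc.2 + st.2)), st.2 + seg))
    ([], 0)).1

-- ===== PRECONDITION & SPEC =====
def Spec_vertical_segment_decimation (nrows : Int) (ncols : Int) (segments : List Int) (dr : Int) (dc : Int) (out : List (Int × Int)) : Prop := out = vertical_segment_decimation_alt nrows ncols segments dr dc
instance (nrows : Int) (ncols : Int) (segments : List Int) (dr : Int) (dc : Int) (out : List (Int × Int)) : Decidable (Spec_vertical_segment_decimation nrows ncols segments dr dc out) := by unfold Spec_vertical_segment_decimation; infer_instance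

-- ===== CLAIM (what is proved, stated in full; the proofs are below) =====
def Claim_equal_vertical_segment_decimation : Prop := ∀ (nrows : Int) (ncols : Int) (segments : List Int) (dr : Int) (dc : Int), Dom_vertical_segment_decimation nrows ncols segments dr dc → Spec_vertical_segment_decimation nrows ncols segments dr dc (vertical_segment_decimation nrows ncols segments dr dc)

-- ===== LEMMAS AND PROOFS =====

-- A's inner rescan loop = find? over the cc's of row rr
theorem scanInner_eq_find (vis : PySem.Set (Int × Int)) (rr : Int) (ccs : List Int) :
    (ccs.map (fun cc => (rr, cc))).find? (fun x => !PySem.Set.contains vis x)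
      = (twScanInner vis rr ccs).map (fun cc => (rr, cc)) := by
  induction ccs with
  | nil => rfl
  | cons cc rest ih =>
    simp only [List.map_cons, List.find?_cons, twScanInner]
    by_cases h : (rr, cc) ∈ vis
    · simpa [PySem.Set.contains, List.find?_map, Function.comp, h] using ih
    · simp [PySem.Set.contains, h]

-- A's nested rescan loops = find? over the row-major cell list
theorem scanOuter_eq_find (vis : PySem.Set (Int × Int)) (ncols : Int) (rows : List Int) :
    twScanOuter vis ncols rows
      = (rows.flatMap (fun rr => (PySem.List.pyRange 0 ncols 1).map (fun cc => (rr, cc)))).find?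
          (fun x => !PySem.Set.contains vis x) := by
  induction rows with
  | nil => rfl
  | cons rr rest ih =>
    simp only [twScanOuter, List.flatMap_cons, List.find?_append, ih,
      scanInner_eq_find vis rr]
    cases twScanInner vis rr (PySem.List.pyRange 0 ncols 1) <;> simp

-- pointer invariant: every cell strictly before index p is visited
def bwInv (cells : List (Int × Int)) (vis : PySem.Set (Int × Int)) (p : Nat) : Prop :=
  ∀ i (h : i < cells.length), i < p → PySem.Set.contains vis cells[i] = true

theorem bwInv_zero (cells : List (Int × Int)) (vis : PySem.Set (Int × Int)) : bwInv cells vis 0 := by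
  intro i h hi; omega

theorem bwInv_add (cells : List (Int × Int)) (vis : PySem.Set (Int × Int)) (p : Nat)
    (x : Int × Int) (h : bwInv cells vis p) : bwInv cells (PySem.Set.add vis x) p := by
  intro i hi hip
  have := h i hi hip
  rw [PySem.Set.contains_iff] at this ⊢
  exact (PySem.Set.mem_add vis x _).mpr (Or.inl this)

theorem bwInv_advance (cells : List (Int × Int)) (vis : PySem.Set (Int × Int)) (p : Nat)
    (h : bwInv cells vis p) : bwInv cells vis (bwAdvance cells vis p) := by
  rw [bwAdvance]
  split
  · rename_i hlt
    split
    · rename_i hc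
      exact bwInv_advance cells vis (p + 1) (by
        intro i hi hip
        rcases Nat.lt_succ_iff_lt_or_eq.mp hip with h' | h'
        · exact h i hi h'
        · subst h'; exact hc)
    · exact h
  · exact h
termination_by cells.length - p

-- B's while-loop pointer finds exactly find? over the tail from p
theorem advance_find (cells : List (Int × Int)) (vis : PySem.Set (Int × Int)) (p : Nat) :
    (cells.drop p).find? (fun x => !PySem.Set.contains vis x)
      = if h : bwAdvance cells vis p < cells.length
          then some cells[bwAdvance cells vis p] else none := by
  by_cases hlt : p < cells.length
  · by_cases hc : cells[p] ∈ vis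
    · have hcb : PySem.Set.contains vis cells[p] = true := (PySem.Set.contains_iff _ _).mpr hc
      have heq : bwAdvance cells vis p = bwAdvance cells vis (p + 1) := by
        rw [bwAdvance]; simp [hlt, hc]
      rw [heq, List.drop_eq_getElem_cons hlt, List.find?_cons]
      simp only [hcb, Bool.not_true]
      exact advance_find cells vis (p + 1)
    · have heq : bwAdvance cells vis p = p := by
        rw [bwAdvance]; simp [hlt, hc]
      rw [heq, List.drop_eq_getElem_cons hlt, List.find?_cons]
      simp [PySem.Set.contains, hc, hlt]
  · have heq : bwAdvance cells vis p = p := by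
      rw [bwAdvance]; simp [hlt]
    rw [heq, List.drop_eq_nil_of_le (by omega)]
    simp [hlt]
termination_by cells.length - p

-- under the invariant, find? over the whole list = find? from the pointer
theorem find_drop (cells : List (Int × Int)) (vis : PySem.Set (Int × Int)) (p : Nat)
    (h : bwInv cells vis p) :
    cells.find? (fun x => !PySem.Set.contains vis x)
      = (cells.drop p).find? (fun x => !PySem.Set.contains vis x) := by
  induction p with
  | zero => rfl
  | succ q ih =>
    have hq : bwInv cells vis q := fun i hi hip => h i hi (by omega)
    rw [ih hq]
    by_cases hlt : q < cells.length
    · rw [List.drop_eq_getElem_cons hlt, List.find?_cons]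
      have := h q hlt (by omega)
      rw [PySem.Set.contains_iff] at this
      simp [this]
    · rw [List.drop_eq_nil_of_le (by omega), List.drop_eq_nil_of_le (by omega)]

-- the two walk loops agree step for step
theorem loop_eq (nrows ncols dr dc : Int) (n : Nat) :
    ∀ (vis : PySem.Set (Int × Int)) (path : List (Int × Int)) (r c : Int) (p : Nat),
      bwInv (bwCells nrows ncols) vis p →
      twLoopA nrows ncols dr dc n vis path r c
        = bwLoop nrows ncols dr dc (bwCells nrows ncols) n vis path r c p := by
  induction n with
  | zero => intro vis path r c p _; rfl
  | succ m ih =>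
    intro vis path r c p hinv
    simp only [twLoopA, bwLoop]
    by_cases hrc : PySem.Set.contains vis (r, c)
    · simp only [hrc, if_true]
      have hscan : twScanOuter vis ncols (PySem.List.pyRange 0 nrows 1)
          = (if h : bwAdvance (bwCells nrows ncols) vis p < (bwCells nrows ncols).length
              then some (bwCells nrows ncols)[bwAdvance (bwCells nrows ncols) vis p] else none) := by
        rw [scanOuter_eq_find, ← bwCells, find_drop _ _ p hinv, advance_find]
      rw [hscan]
      by_cases hlen : bwAdvance (bwCells nrows ncols) vis p < (bwCells nrows ncols).length
      · simp only [dif_pos hlen]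
        exact ih _ _ _ _ _ (bwInv_add _ _ _ _ (bwInv_advance _ _ _ hinv))
      · simp only [dif_neg hlen]
    · simp only [hrc]
      exact ih _ _ _ _ _ (bwInv_add _ _ _ _ hinv)

theorem walk_eq (nrows ncols dr dc : Int) :
    toroidal_walk nrows ncols dr dc 0 0 = bwWalk nrows ncols dr dc := by
  unfold toroidal_walk bwWalk
  by_cases h : nrows * ncols ≤ 0
  · rw [if_pos h, Int.toNat_of_nonpos h]
    rfl
  · rw [if_neg h]
    exact loop_eq nrows ncols dr dc _ _ _ _ _ 0 (bwInv_zero _ _)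

theorem fold_eq (nrows dr dc : Int) (segs : List Int) :
    ∀ (st : List (Int × Int) × Int),
      segs.foldl
        (fun (st : List (Int × Int) × Int) seg_cols =>
          ((toroidal_walk nrows seg_cols dr dc 0 0).foldl
            (fun path rc => path ++ [(rc.1, rc.2 + st.2)]) st.1,
           st.2 + seg_cols)) st
      = segs.foldl
          (fun (st : List (Int × Int) × Int) seg =>
            (st.1 ++ (bwWalk nrows seg dr dc).map (fun rc => (rc.1, rc.2 + st.2)), st.2 + seg)) st := by
  induction segs with
  | nil => intro st; rfl
  | cons seg rest ih =>
    intro st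
    simp only [List.foldl_cons]
    rw [walk_eq, PySem.List.foldl_append_singleton_eq_map
      (fun rc : Int × Int => (rc.1, rc.2 + st.2)) (bwWalk nrows seg dr dc) st.1]
    exact ih _

-- ===== VERDICT (by name: the statement is the Claim_ definition above) =====
theorem vertical_segment_decimation_spec : Claim_equal_vertical_segment_decimation := by
  intro nrows ncols segments dr dc _
  unfold Spec_vertical_segment_decimation vertical_segment_decimation vertical_segment_decimation_alt
  rw [fold_eq]
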